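-- pv_equiv track=rewrite | github.com/drets/algo | big_integer.py | to_bi
-- ===== SOURCE A (Python) =====
-- def to_bi(s):
--     a=[]
--     i=len(s)
--     while i>0:
--         if i<9:
--             a.append(int(s[0:i]))
--         else:
--             p=i-9
--             a.append(int(s[p:i]))
--         i-=9
--     clean_zeros(a)
--     return a
--
-- def clean_zeros(a):
--     while len(a)>1 and a[-1]==0:
--         a.pop()
-- ===== SOURCE B (Python) =====
-- def to_bi(s):
--     # Chunk the string FORWARD (big-endian: first chunk is len(s) % 9 chars,
--     # then 9-char chunks), parse each chunk, drop leading zero groups keeping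
--     # at least one, and reverse into the little-endian result.
--     big = []
--     first = len(s) % 9
--     if first:
--         big.append(s[:first])
--     j = first
--     while j < len(s):
--         big.append(s[j:j + 9])
--         j += 9
--     vals = [int(c) for c in big]
--     i = 0
--     while i < len(vals) - 1 and vals[i] == 0:
--         i += 1
--     return vals[i:][::-1]
-- ===== Notes on version B (the rewrite author's own statement) =====
-- stated objective: alternative
-- what changed: B chunks the string forward (one first chunk of len%9 chars, then 9-char chunks) collecting big-endian values in one pass, strips leading zero groups by scanning to the first nonzero index and slicing, and reverses once at the end, instead of A's backward index loop with per-branch slice bounds and the destructive pop-loop clean_zeros.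
import Mathlib
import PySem

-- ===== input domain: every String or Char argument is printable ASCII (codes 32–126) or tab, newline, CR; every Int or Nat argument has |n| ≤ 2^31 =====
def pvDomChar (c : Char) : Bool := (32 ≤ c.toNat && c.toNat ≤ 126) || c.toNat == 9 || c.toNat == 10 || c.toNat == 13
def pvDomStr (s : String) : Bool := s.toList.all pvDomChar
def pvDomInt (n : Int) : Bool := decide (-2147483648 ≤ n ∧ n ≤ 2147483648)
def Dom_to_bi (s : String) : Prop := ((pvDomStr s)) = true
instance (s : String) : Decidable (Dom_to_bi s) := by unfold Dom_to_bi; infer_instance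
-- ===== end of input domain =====

-- B chunks the string forward (first chunk of len%9 chars, then 9-char chunks), strips
-- leading zero groups by index scan + slice and reverses once, instead of A's backward
-- index loop and destructive pop-loop; same cost, different structure (objective: alternative).


-- ===== PORT A =====
-- int(t); Pre_ excludes the inputs where some int() call gets an unparsable chunk (Python raises ValueError)
def pyInt (t : String) : Int := (PySem.Int.ofStr? t).getD 0

-- clean_zeros: pop trailing zeros while more than one element remains (a[-1] via pyGet?)
def cleanZeros (a : List Int) : List Int :=
  if h : 1 < a.length ∧ PySem.List.pyGet? a (-1) = some 0 then cleanZeros a.dropLast else a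
termination_by a.length
decreasing_by simp [List.length_dropLast]; omega

-- the while i>0 loop of A: slice the 9 chars below i (or s[0:i] when i<9), append, i -= 9
def toBiLoop (s : String) (i : Int) (a : List Int) : List Int :=
  if h : 0 < i then
    if i < 9 then toBiLoop s (i - 9) (a ++ [pyInt (PySem.Str.slice s (some 0) (some i))])
    else toBiLoop s (i - 9) (a ++ [pyInt (PySem.Str.slice s (some (i - 9)) (some i))])
  else a
termination_by i.toNat
decreasing_by all_goals omega

def to_bi (s : String) : List Int := cleanZeros (toBiLoop s (PySem.Str.len s) [])

-- ===== PORT B =====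
-- the while j<len(s) loop of B: append s[j:j+9], j += 9
def bChunks (s : String) (j : Nat) (big : List String) : List String :=
  if h : j < s.length then
    bChunks s (j + 9) (big ++ [PySem.Str.slice s (some (j : Int)) (some ((j : Int) + 9))])
  else big
termination_by s.length - j
decreasing_by omega

-- the while i<len(vals)-1 and vals[i]==0 loop of B
def bStrip (vals : List Int) (i : Nat) : Nat :=
  if h : i < vals.length - 1 ∧ PySem.List.pyGet? vals (i : Int) = some 0 then bStrip vals (i + 1)
  else i
termination_by vals.length - i
decreasing_by omega

def to_bi_alt (s : String) : List Int :=
  let first := s.length % 9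
  let big : List String := if first ≠ 0 then [PySem.Str.slice s none (some (first : Int))] else []
  let big := bChunks s first big
  let vals := big.map pyInt
  let i := bStrip vals 0
  (PySem.List.slice vals (some (i : Int)) none).reverse

-- ===== PRECONDITION & SPEC =====
-- Exactly the inputs on which Python A returns: every 9-char group of s (counted from the
-- right) must parse as a Python int — on any other input int() raises ValueError (in both
-- A and B, which parse the same groups).
def Pre_to_bi (s : String) : Prop :=
  ∀ j < (s.toList.length + 8) / 9,
    (PySem.Int.ofChars? (((s.toList.reverse.drop (9 * j)).take 9).reverse)).isSome = true
instance (s : String) : Decidable (Pre_to_bi s) := by unfold Pre_to_bi; infer_instance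
def pvWitness_to_bi : String := ("12")
def Spec_to_bi (s : String) (out : List Int) : Prop := out = to_bi_alt s
instance (s : String) (out : List Int) : Decidable (Spec_to_bi s out) := by unfold Spec_to_bi; infer_instance

-- ===== CLAIM (what is proved, stated in full; the proofs are below) =====
def Claim_equal_to_bi : Prop := ∀ (s : String), Dom_to_bi s → Pre_to_bi s → Spec_to_bi s (to_bi s)

-- ===== LEMMAS AND PROOFS =====

-- parse on the char-list level
def pv (l : List Char) : Int := (PySem.Int.ofChars? l).getD 0

theorem pyInt_eq (t : String) : pyInt t = pv t.toList := rfl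

-- forward 9-char chunking of a list (big-endian tail after the first short chunk)
def nineChunks (l : List Char) : List (List Char) :=
  if h : l = [] then [] else l.take 9 :: nineChunks (l.drop 9)
termination_by l.length
decreasing_by simp [List.length_drop]; exact List.length_pos_of_ne_nil h

def bigChunks (l : List Char) : List (List Char) :=
  (if l.length % 9 = 0 then [] else [l.take (l.length % 9)]) ++ nineChunks (l.drop (l.length % 9))

theorem nineChunks_nil : nineChunks [] = [] := by
  rw [nineChunks]; simp

theorem nineChunks_cons (l : List Char) (h : l ≠ []) :
    nineChunks l = l.take 9 :: nineChunks (l.drop 9) := by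
  rw [nineChunks]; simp [h]

theorem nineChunks_append (x e : List Char) (hx : x.length % 9 = 0) (he : e.length = 9) :
    nineChunks (x ++ e) = nineChunks x ++ [e] := by
  by_cases h0 : x = []
  · subst h0
    have he' : e ≠ [] := by intro h; simp [h] at he
    rw [List.nil_append, nineChunks_nil, nineChunks_cons e he',
        List.take_of_length_le (by omega), List.drop_eq_nil_of_le (by omega), nineChunks_nil]
    rfl
  · have h9 : 9 ≤ x.length := by
      have := List.length_pos_of_ne_nil h0; omega
    rw [nineChunks_cons (x ++ e) (by simp [h0]), nineChunks_cons x h0,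
        List.take_append_of_le_length h9, List.drop_append_of_le_length h9,
        nineChunks_append (x.drop 9) e (by simp [List.length_drop]; omega) he]
    simp
termination_by x.length
decreasing_by simp [List.length_drop]; omega

theorem bigChunks_append (m e : List Char) (he : e.length = 9) :
    bigChunks (m ++ e) = bigChunks m ++ [e] := by
  unfold bigChunks
  have hr : (m ++ e).length % 9 = m.length % 9 := by
    simp [List.length_append, he]
  have hrm : m.length % 9 ≤ m.length := Nat.mod_le _ _
  rw [hr, List.take_append_of_le_length hrm, List.drop_append_of_le_length hrm,
      nineChunks_append (m.drop (m.length % 9)) e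
        (by simp [List.length_drop]; omega) he]
  simp [List.append_assoc]

theorem toBiLoop_nonpos (s : String) (i : Int) (a : List Int) (h : i ≤ 0) :
    toBiLoop s i a = a := by
  rw [toBiLoop]; simp; omega

theorem toBiLoop_eq (s : String) (i : Nat) (hi : i ≤ s.toList.length) (a : List Int) :
    toBiLoop s (i : Int) a = a ++ ((bigChunks (s.toList.take i)).map pv).reverse := by
  by_cases h0 : i = 0
  · subst h0
    rw [Nat.cast_zero, toBiLoop_nonpos s 0 a (le_refl 0)]
    simp [bigChunks, nineChunks_nil]
  · rw [toBiLoop, dif_pos (by exact_mod_cast Nat.pos_of_ne_zero h0)]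
    by_cases h9 : i < 9
    · rw [if_pos (by exact_mod_cast h9), toBiLoop_nonpos s _ _ (by omega)]
      have hch : pyInt (PySem.Str.slice s (some 0) (some (i : Int)))
          = pv (s.toList.take i) := by
        rw [pyInt_eq]
        congr 1
        simp [PySem.Str.toList_slice, PySem.List.slice_to_natCast]
      have hbig : bigChunks (s.toList.take i) = [s.toList.take i] := by
        unfold bigChunks
        have hlen : (s.toList.take i).length = i := by
          have hsl : s.toList.length = s.length := rfl
          simp [List.length_take]; omega
        rw [hlen, Nat.mod_eq_of_lt h9, if_neg h0]
        simp [nineChunks_nil, List.take_take]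
      rw [hch, hbig]
      simp
    · rw [if_neg (by exact_mod_cast h9)]
      have hcast : (i : Int) - 9 = ((i - 9 : Nat) : Int) := by omega
      rw [hcast, toBiLoop_eq s (i - 9) (by omega) _]
      have hch : pyInt (PySem.Str.slice s (some ((i - 9 : Nat) : Int)) (some (i : Int)))
          = pv ((s.toList.drop (i - 9)).take 9) := by
        rw [pyInt_eq]
        congr 1
        simp [PySem.Str.toList_slice, PySem.List.slice_natCast]
        congr 1
        omega
      have he : ((s.toList.drop (i - 9)).take 9).length = 9 := by
        have hsl : s.toList.length = s.length := rfl
        simp [List.length_take, List.length_drop]; omega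
      have hsplit : s.toList.take i = s.toList.take (i - 9) ++ (s.toList.drop (i - 9)).take 9 := by
        conv_lhs => rw [show i = (i - 9) + 9 by omega]
        exact List.take_add
      rw [hch, hsplit, bigChunks_append _ _ he]
      simp
termination_by i
decreasing_by omega

theorem bChunks_eq (s : String) (j : Nat) (big : List String) :
    (bChunks s j big).map pyInt = big.map pyInt ++ (nineChunks (s.toList.drop j)).map pv := by
  rw [bChunks]
  by_cases h : j < s.length
  · rw [dif_pos h, bChunks_eq s (j + 9)]
    have hne : s.toList.drop j ≠ [] := by
      have hsl : s.toList.length = s.length := rfl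
      intro hnil
      have := congrArg List.length hnil
      simp [List.length_drop] at this
      omega
    rw [nineChunks_cons _ hne]
    have hch : pyInt (PySem.Str.slice s (some (j : Int)) (some ((j : Int) + 9)))
        = pv ((s.toList.drop j).take 9) := by
      rw [pyInt_eq]
      congr 1
      simp only [PySem.Str.toList_slice, PySem.Chars.slice_eq_listSlice]
      rw [show (j : Int) + 9 = ((j + 9 : Nat) : Int) from by omega, PySem.List.slice_natCast]
      congr 1
      omega
    rw [List.drop_drop]
    simp [hch]
  · rw [dif_neg h]
    have : s.toList.drop j = [] := by
      apply List.drop_eq_nil_of_le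
      have hsl : s.toList.length = s.length := rfl
      omega
    simp [this, nineChunks_nil]
termination_by s.length - j
decreasing_by omega

theorem bStrip_cons (x : Int) (R : List Int) (i : Nat) :
    bStrip (x :: R) (i + 1) = bStrip R i + 1 := by
  rw [bStrip]
  conv_rhs => rw [bStrip]
  have hg : PySem.List.pyGet? (x :: R) ((i + 1 : Nat) : Int) = PySem.List.pyGet? R (i : Nat) := by
    simp [PySem.List.pyGet?_natCast]
  by_cases hc : i < R.length - 1 ∧ PySem.List.pyGet? R (i : Nat) = some 0
  · rw [dif_pos ⟨by simp; omega, by rw [hg]; exact hc.2⟩, dif_pos hc]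
    exact bStrip_cons x R (i + 1)
  · rw [dif_neg (fun h => hc ⟨by have := h.1; simp at this; omega, by rw [← hg]; exact h.2⟩),
        dif_neg hc]
termination_by R.length - i
decreasing_by omega

theorem clean_strip (R : List Int) : cleanZeros R.reverse = (R.drop (bStrip R 0)).reverse := by
  induction R with
  | nil => rw [cleanZeros, bStrip]; simp
  | cons x R' ih =>
    by_cases hR : R' = []
    · subst hR
      rw [cleanZeros, bStrip]
      simp
    · have hpos := List.length_pos_of_ne_nil hR
      by_cases hx : x = 0
      · subst hx
        have h1 : bStrip (0 :: R') 0 = bStrip R' 0 + 1 := by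
          rw [bStrip, dif_pos ⟨by simp; omega, by simp⟩]
          exact bStrip_cons 0 R' 0
        rw [h1, List.drop_succ_cons, ← ih, cleanZeros,
            dif_pos ⟨by simp; omega,
              by rw [PySem.List.pyGet?_neg_one]; simp [List.getLast?_reverse]⟩]
        congr 1
        rw [List.reverse_cons, List.dropLast_concat]
      · have h0 : bStrip (x :: R') 0 = 0 := by
          rw [bStrip, dif_neg]
          intro h
          exact hx (by simpa using h.2)
        rw [h0, List.drop_zero, cleanZeros, dif_neg]
        intro h
        have := h.2
        rw [PySem.List.pyGet?_neg_one, List.getLast?_reverse] at this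
        exact hx (by simpa using this)

theorem alt_vals (s : String) :
    (bChunks s (s.length % 9)
      (if s.length % 9 ≠ 0 then [PySem.Str.slice s none (some ((s.length % 9 : Nat) : Int))]
       else [])).map pyInt = (bigChunks s.toList).map pv := by
  have hsl : s.toList.length = s.length := rfl
  rw [bChunks_eq]
  unfold bigChunks
  rw [List.map_append, hsl]
  congr 1
  by_cases h : s.length % 9 = 0
  · simp [h]
  · have harg : (PySem.Str.slice s none (some ((s.length % 9 : Nat) : Int))).toList
        = List.take (s.length % 9) s.toList := by
      rw [PySem.Str.toList_slice]
      simp only [PySem.Chars.slice_eq_listSlice]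
      exact PySem.List.slice_to_natCast _ _
    have hel : pyInt (PySem.Str.slice s none (some ((s.length % 9 : Nat) : Int)))
        = pv (List.take (s.length % 9) s.toList) := by
      rw [pyInt_eq, harg]
    simp only [ne_eq, h, not_false_eq_true, if_true, if_false,
      List.map_cons, List.map_nil, hel]

theorem to_bi_eq_alt (s : String) : to_bi s = to_bi_alt s := by
  have hA : to_bi s = cleanZeros (((bigChunks s.toList).map pv).reverse) := by
    unfold to_bi
    rw [PySem.Str.len_eq, toBiLoop_eq s s.toList.length (le_refl _) [], List.take_length]
    simp
  rw [hA, clean_strip]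
  unfold to_bi_alt
  simp only [alt_vals, PySem.List.slice_from_natCast]

-- ===== VERDICT (by name: the statement is the Claim_ definition above) =====
theorem to_bi_spec : Claim_equal_to_bi := by
  intro s _ _
  show to_bi s = to_bi_alt s
  exact to_bi_eq_alt s
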